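-- pv_equiv track=rewrite | github.com/Sartaj-S/Portfolio | Python/Woosh Sequencer/sequencer.py | getReadingFrame
-- ===== SOURCE A (Python) =====
-- def getReadingFrame(sequence):
--     start = False
--     sCodon = ""
--     i = 0
--     while start != True and i < len(sequence):
--         if sCodon == "":
--             if (sequence[i].upper() == "A"):
--                 sCodon = "A"
--         elif sCodon == "A" :
--             if (sequence[i].upper() == "T"):
--                 sCodon = "AT"
--         elif sCodon == "AT" :
--             if sequence[i].upper() == "G":
--                 sCodon = "ATG"
--                 i = i - 3
--                 start = True
--         i+=1
--
--     if start == True: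
--         return i
--     else:
--         return -1
-- ===== SOURCE B (Python) =====
-- def getReadingFrame(sequence):
--     def _find(target, start):
--         i = start
--         for ch in sequence[start:]:
--             if ch.upper() == target:
--                 return i
--             i += 1
--         return -1
--
--     p = _find("A", 0)
--     if p < 0:
--         return -1
--     q = _find("T", p + 1)
--     if q < 0:
--         return -1
--     r = _find("G", q + 1)
--     if r < 0:
--         return -1
--     return r - 2
-- ===== Notes on version B (the rewrite author's own statement) =====
-- stated objective: idiomatic
-- what changed: Replaced the single-pass sCodon string state machine by three chained forward searches (find 'A', then 'T' after it, then 'G' after that, returning r-2), the way a developer would decompose a subsequence search.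
import Mathlib
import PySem

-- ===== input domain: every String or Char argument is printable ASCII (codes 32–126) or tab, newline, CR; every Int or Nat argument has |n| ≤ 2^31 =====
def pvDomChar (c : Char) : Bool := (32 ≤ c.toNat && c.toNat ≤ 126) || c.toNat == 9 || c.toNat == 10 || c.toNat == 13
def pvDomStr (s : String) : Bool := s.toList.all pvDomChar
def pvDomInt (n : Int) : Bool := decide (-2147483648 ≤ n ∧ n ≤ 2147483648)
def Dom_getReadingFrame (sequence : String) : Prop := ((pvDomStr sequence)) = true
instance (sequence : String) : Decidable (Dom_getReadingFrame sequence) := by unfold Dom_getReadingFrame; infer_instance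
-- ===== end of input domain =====

-- B replaces A's single-pass sCodon state machine by three chained forward searches (idiomatic decomposition; same cost).
-- Char.toUpper is exact for Python's str.upper on the ASCII domain Dom guarantees.

-- ===== PORT A =====
-- A's while loop: index i, state string sCodon ∈ {"", "A", "AT"}; recursion over the remaining characters.
def pvALoop (cs : List Char) (i : Int) (sCodon : String) : Int :=
  match cs with
  | [] => -1                                   -- loop exits with start = False → return -1
  | c :: rest =>
    if sCodon == "" then
      if c.toUpper == 'A' then pvALoop rest (i + 1) "A" else pvALoop rest (i + 1) ""
    else if sCodon == "A" then
      if c.toUpper == 'T' then pvALoop rest (i + 1) "AT" else pvALoop rest (i + 1) "A"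
    else
      if c.toUpper == 'G' then (i - 3) + 1     -- i = i-3; i += 1; start = True → return i
      else pvALoop rest (i + 1) sCodon

def getReadingFrame (sequence : String) : Int :=
  pvALoop sequence.toList 0 ""

-- ===== PORT B =====
-- B's helper _find(target, start): scan sequence[start:] carrying the absolute index i.
def pvFind (cs : List Char) (i : Int) (target : Char) : Int :=
  match cs with
  | [] => -1
  | c :: rest => if c.toUpper == target then i else pvFind rest (i + 1) target

def getReadingFrame_alt (sequence : String) : Int :=
  let cs := sequence.toList
  let p := pvFind cs 0 'A'
  if p < 0 then -1
  else
    let q := pvFind (cs.drop (p + 1).toNat) (p + 1) 'T'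
    if q < 0 then -1
    else
      let r := pvFind (cs.drop (q + 1).toNat) (q + 1) 'G'
      if r < 0 then -1 else r - 2

-- ===== PRECONDITION & SPEC =====
def Spec_getReadingFrame (sequence : String) (out : Int) : Prop := out = getReadingFrame_alt sequence
instance (sequence : String) (out : Int) : Decidable (Spec_getReadingFrame sequence out) := by unfold Spec_getReadingFrame; infer_instance

-- ===== CLAIM (what is proved, stated in full; the proofs are below) =====
def Claim_equal_getReadingFrame : Prop := ∀ (sequence : String), Dom_getReadingFrame sequence → Spec_getReadingFrame sequence (getReadingFrame sequence)

-- ===== LEMMAS AND PROOFS =====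

-- pvFind either fails (-1) or returns an index ≥ its starting index.
theorem pvFind_bound (cs : List Char) (i : Int) (t : Char) :
    pvFind cs i t = -1 ∨ i ≤ pvFind cs i t := by
  induction cs generalizing i with
  | nil => exact Or.inl rfl
  | cons c rest ih =>
    simp only [pvFind]
    split
    · omega
    · rcases ih (i + 1) with h | h
      · exact Or.inl h
      · exact Or.inr (by omega)

-- Stage "AT": A's remaining loop is B's search for 'G' (returning r-2 on success).
theorem stageG (cs : List Char) (i : Int) (hi : 0 ≤ i) :
    pvALoop cs i "AT" =
      (if pvFind cs i 'G' < 0 then -1 else pvFind cs i 'G' - 2) := by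
  induction cs generalizing i with
  | nil => simp [pvALoop, pvFind]
  | cons c rest ih =>
    by_cases hc : c.toUpper = 'G'
    · have hnn : ¬ i < 0 := by omega
      simp [pvALoop, pvFind, hc, hnn]
      omega
    · simpa [pvALoop, pvFind, hc] using ih (i + 1) (by omega)

-- Stage "A": A's remaining loop is B's search for 'T' chained with the 'G' search.
theorem stageT (cs : List Char) (i : Int) (hi : 0 ≤ i) :
    pvALoop cs i "A" =
      (if pvFind cs i 'T' < 0 then -1
       else if pvFind (cs.drop (pvFind cs i 'T' - i + 1).toNat) (pvFind cs i 'T' + 1) 'G' < 0 then -1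
       else pvFind (cs.drop (pvFind cs i 'T' - i + 1).toNat) (pvFind cs i 'T' + 1) 'G' - 2) := by
  induction cs generalizing i with
  | nil => simp [pvALoop, pvFind]
  | cons c rest ih =>
    by_cases hc : c.toUpper = 'T'
    · have hnn : ¬ i < 0 := by omega
      simp [pvALoop, pvFind, hc, hnn, stageG rest (i + 1) (by omega : (0:Int) ≤ i + 1)]
    · simp only [pvALoop, pvFind]
      simp [hc]
      rw [ih (i + 1) (by omega)]
      rcases pvFind_bound rest (i + 1) 'T' with h | h
      · simp [h]
      · set q := pvFind rest (i + 1) 'T' with hq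
        have hnq : ¬ q < 0 := by omega
        have h1 : (q - i + 1).toNat = (q - (i + 1) + 1).toNat + 1 := by omega
        simp only [hnq, if_false, h1, List.drop_succ_cons]

-- Stage "": A's whole loop is B's three chained searches (drops stated relative to cs).
theorem stageA (cs : List Char) (i : Int) (hi : 0 ≤ i) :
    pvALoop cs i "" =
      (if pvFind cs i 'A' < 0 then -1
       else
         if pvFind (cs.drop (pvFind cs i 'A' - i + 1).toNat) (pvFind cs i 'A' + 1) 'T' < 0 then -1
         else
           if pvFind ((cs.drop (pvFind cs i 'A' - i + 1).toNat).drop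
                 (pvFind (cs.drop (pvFind cs i 'A' - i + 1).toNat) (pvFind cs i 'A' + 1) 'T'
                   - (pvFind cs i 'A' + 1) + 1).toNat)
               (pvFind (cs.drop (pvFind cs i 'A' - i + 1).toNat) (pvFind cs i 'A' + 1) 'T' + 1) 'G' < 0 then -1
           else
             pvFind ((cs.drop (pvFind cs i 'A' - i + 1).toNat).drop
                 (pvFind (cs.drop (pvFind cs i 'A' - i + 1).toNat) (pvFind cs i 'A' + 1) 'T'
                   - (pvFind cs i 'A' + 1) + 1).toNat)
               (pvFind (cs.drop (pvFind cs i 'A' - i + 1).toNat) (pvFind cs i 'A' + 1) 'T' + 1) 'G' - 2) := by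
  induction cs generalizing i with
  | nil => simp [pvALoop, pvFind]
  | cons c rest ih =>
    by_cases hc : c.toUpper = 'A'
    · have hnn : ¬ i < 0 := by omega
      simp [pvALoop, pvFind, hc, hnn, stageT rest (i + 1) (by omega : (0:Int) ≤ i + 1)]
    · simp only [pvALoop, pvFind]
      simp [hc]
      rw [ih (i + 1) (by omega)]
      rcases pvFind_bound rest (i + 1) 'A' with h | h
      · simp [h]
      · set p := pvFind rest (i + 1) 'A' with hp
        have hnp : ¬ p < 0 := by omega
        have h1 : (p - i + 1).toNat = (p - (i + 1) + 1).toNat + 1 := by omega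
        have dd : ∀ (l : List Char) (k m : Nat), List.drop (k + 1 + m) (c :: l) = List.drop m (List.drop k l) := by
          intro l k m
          rw [List.drop_drop, show k + 1 + m = m + k + 1 from by omega, List.drop_succ_cons, Nat.add_comm m k]
        simp only [hnp, if_false, h1, List.drop_succ_cons, dd]

-- ===== VERDICT (by name: the statement is the Claim_ definition above) =====
theorem getReadingFrame_spec : Claim_equal_getReadingFrame := by
  intro s _
  unfold Spec_getReadingFrame getReadingFrame getReadingFrame_alt
  rw [stageA s.toList 0 le_rfl]
  simp only [Int.sub_zero]
  rcases pvFind_bound s.toList 0 'A' with h | h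
  · simp [h]
  · set p := pvFind s.toList 0 'A' with hp
    have hnp : ¬ p < 0 := by omega
    simp only [hnp, if_false]
    rcases pvFind_bound (s.toList.drop (p + 1).toNat) (p + 1) 'T' with h2 | h2
    · simp [h2]
    · set q := pvFind (s.toList.drop (p + 1).toNat) (p + 1) 'T' with hq
      have hnq : ¬ q < 0 := by omega
      simp only [hnq, if_false]
      rw [List.drop_drop]
      have e : ((p + 1).toNat + (q - (p + 1) + 1).toNat) = (q + 1).toNat := by omega
      rw [e]
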